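-- pv_equiv track=rewrite | github.com/goulart-pedro/TP1-Alg2 | src/search.py | search_tokenizer
-- ===== SOURCE A (Python) =====
-- def search_tokenizer(search_str: str):
--     tokens = []
--     i = 0
--     n = len(search_str)
--
--     while i < n:
--         char = search_str[i]
--
--         # Ignorar espaços em branco
--         if char.isspace():
--             i += 1
--             continue
--
--         # Parêntese esquerdo
--         elif char == '(':
--             tokens.append(('paren', '('))
--             i += 1
--
--         # Parêntese direito
--         elif char == ')':
--             tokens.append(('paren', ')'))
--             i += 1
--
--         # Operadores AND/OR
--         elif char.isalpha():
--             # Coletar a palavra completa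
--             start = i
--             while i < n and search_str[i].isalpha():
--                 i += 1
--             word = search_str[start:i]
--
--             if word.upper() in ('AND', 'OR'):
--                 tokens.append(('operator', word.upper()))
--             else:
--                 tokens.append(('keyword', word))
--
--         # Caracteres não reconhecidos (podem ser tratados como parte de palavras)
--         else:
--             # Coletar sequência de caracteres não-espaço como palavra
--             start = i
--             while i < n and not search_str[i].isspace() and search_str[i] not in '()':
--                 i += 1
--             word = search_str[start:i]
--             tokens.append(('keyword', word))
--
--     return tokens
-- ===== SOURCE B (Python) =====
-- def search_tokenizer(search_str: str):
--     # One-pass state-machine fold over the characters: no indices, no inner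
--     # scanning loops; a pending-token state (mode, buf) is flushed at boundaries.
--     tokens = []
--     mode = None      # None = no pending token, 'alpha' = letter run, 'other' = non-space run
--     buf = []
--
--     def flush():
--         nonlocal mode, buf
--         if mode is None:
--             return
--         word = ''.join(buf)
--         if mode == 'alpha' and word.upper() in ('AND', 'OR'):
--             tokens.append(('operator', word.upper()))
--         else:
--             tokens.append(('keyword', word))
--         mode, buf = None, []
--
--     for ch in search_str:
--         if ch.isspace():
--             flush()
--         elif ch in '()':
--             flush()
--             tokens.append(('paren', ch))
--         elif mode == 'alpha' and ch.isalpha():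
--             buf.append(ch)
--         elif mode == 'other':
--             buf.append(ch)
--         elif mode == 'alpha':
--             # a letter run ends at a non-letter; that char starts a non-space run
--             flush()
--             mode, buf = 'other', [ch]
--         else:
--             mode = 'alpha' if ch.isalpha() else 'other'
--             buf = [ch]
--     flush()
--     return tokens
-- ===== Notes on version B (the rewrite author's own statement) =====
-- stated objective: alternative
-- what changed: Replaced the index-based outer loop with nested word-scanning while loops and slicing by a single character-at-a-time state-machine pass that keeps a pending (mode, buffer) token and flushes it at boundaries.
import Mathlib
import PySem

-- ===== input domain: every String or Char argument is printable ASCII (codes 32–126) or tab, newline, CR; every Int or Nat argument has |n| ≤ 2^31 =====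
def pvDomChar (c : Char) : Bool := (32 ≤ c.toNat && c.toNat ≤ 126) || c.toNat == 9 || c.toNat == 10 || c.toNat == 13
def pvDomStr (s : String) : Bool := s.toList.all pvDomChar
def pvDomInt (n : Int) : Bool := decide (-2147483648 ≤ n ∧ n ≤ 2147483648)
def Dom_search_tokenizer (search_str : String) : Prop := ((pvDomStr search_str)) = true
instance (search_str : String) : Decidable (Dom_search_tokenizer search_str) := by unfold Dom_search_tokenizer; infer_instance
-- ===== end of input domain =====

-- B replaces A's index-based loop with nested word-scanning while loops by a single
-- character-at-a-time state-machine pass with a pending (mode, buffer) token (objective: alternative).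

-- ===== PORT A =====
-- inner while of A's alpha branch: advance while isalpha; returns (collected word chars, rest)
def pvScanAlpha : List Char → List Char × List Char
  | [] => ([], [])
  | c :: cs =>
    if PySem.Chars.isalpha c then
      let p := pvScanAlpha cs
      (c :: p.1, p.2)
    else ([], c :: cs)

-- inner while of A's else branch: advance while not space and not in '()'
def pvScanOther : List Char → List Char × List Char
  | [] => ([], [])
  | c :: cs =>
    if ¬ PySem.Chars.isspace c ∧ c ≠ '(' ∧ c ≠ ')' then
      let p := pvScanOther cs
      (c :: p.1, p.2)
    else ([], c :: cs)

theorem pvScanAlpha_snd_length (cs : List Char) : (pvScanAlpha cs).2.length ≤ cs.length := by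
  induction cs with
  | nil => simp [pvScanAlpha]
  | cons c cs ih =>
    simp only [pvScanAlpha]
    split <;> simp <;> omega

theorem pvScanOther_snd_length (cs : List Char) : (pvScanOther cs).2.length ≤ cs.length := by
  induction cs with
  | nil => simp [pvScanOther]
  | cons c cs ih =>
    simp only [pvScanOther]
    split <;> simp <;> omega

-- A's outer while loop over the remaining characters (the slice search_str[start:i]
-- is exactly the run of characters the inner while consumed)
def pvLoopA : List Char → List (String × String)
  | [] => []
  | c :: cs =>
    if PySem.Chars.isspace c then pvLoopA cs
    else if c = '(' then ("paren", "(") :: pvLoopA cs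
    else if c = ')' then ("paren", ")") :: pvLoopA cs
    else if PySem.Chars.isalpha c then
      let p := pvScanAlpha cs
      let word := String.mk (c :: p.1)
      let up := PySem.Str.upper word
      (if up = "AND" ∨ up = "OR" then ("operator", up) else ("keyword", word)) :: pvLoopA p.2
    else
      let p := pvScanOther cs
      ("keyword", String.mk (c :: p.1)) :: pvLoopA p.2
termination_by cs => cs.length
decreasing_by
  all_goals
    (have h1 := pvScanAlpha_snd_length cs; have h2 := pvScanOther_snd_length cs; simp; try omega)

def search_tokenizer (search_str : String) : List (String × String) :=
  pvLoopA search_str.toList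

-- ===== PORT B =====
-- flush(): emit the pending token, if any
def pvFlushB (toks : List (String × String)) : Option (Bool × List Char) → List (String × String)
  | none => toks
  | some (isAl, buf) =>
    let word := String.mk buf
    let up := PySem.Str.upper word
    if isAl ∧ (up = "AND" ∨ up = "OR") then toks ++ [("operator", up)]
    else toks ++ [("keyword", word)]

-- one step of B's for-loop: state = (tokens so far, pending token)
def pvStepB (st : List (String × String) × Option (Bool × List Char)) (ch : Char) :
    List (String × String) × Option (Bool × List Char) :=
  if PySem.Chars.isspace ch then (pvFlushB st.1 st.2, none)
  else if ch = '(' ∨ ch = ')' then (pvFlushB st.1 st.2 ++ [("paren", String.mk [ch])], none)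
  else
    match st.2 with
    | some (true, buf) =>
      if PySem.Chars.isalpha ch then (st.1, some (true, buf ++ [ch]))
      else (pvFlushB st.1 (some (true, buf)), some (false, [ch]))
    | some (false, buf) => (st.1, some (false, buf ++ [ch]))
    | none => (st.1, some (PySem.Chars.isalpha ch, [ch]))

def search_tokenizer_alt (search_str : String) : List (String × String) :=
  let r := search_str.toList.foldl pvStepB ([], none)
  pvFlushB r.1 r.2

-- ===== PRECONDITION & SPEC =====
def Spec_search_tokenizer (search_str : String) (out : List (String × String)) : Prop := out = search_tokenizer_alt search_str
instance (search_str : String) (out : List (String × String)) : Decidable (Spec_search_tokenizer search_str out) := by unfold Spec_search_tokenizer; infer_instance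

-- ===== CLAIM (what is proved, stated in full; the proofs are below) =====
def Claim_equal_search_tokenizer : Prop := ∀ (search_str : String), Dom_search_tokenizer search_str → Spec_search_tokenizer search_str (search_tokenizer search_str)

-- ===== LEMMAS AND PROOFS =====

-- running B's fold from a given state and flushing at the end
def pvRun (st : List (String × String) × Option (Bool × List Char)) (cs : List Char) :
    List (String × String) :=
  let r := cs.foldl pvStepB st
  pvFlushB r.1 r.2

theorem pvRun_nil (st : List (String × String) × Option (Bool × List Char)) :
    pvRun st [] = pvFlushB st.1 st.2 := rfl

theorem pvRun_cons (st : List (String × String) × Option (Bool × List Char)) (c : Char)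
    (cs : List Char) : pvRun st (c :: cs) = pvRun (pvStepB st c) cs := rfl

-- how A classifies a completed letter run (matches pvLoopA's alpha branch and pvFlushB's alpha flush)
def pvEmitA (buf : List Char) : String × String :=
  let word := String.mk buf
  let up := PySem.Str.upper word
  if up = "AND" ∨ up = "OR" then ("operator", up) else ("keyword", word)

theorem pvFlush_none (toks : List (String × String)) : pvFlushB toks none = toks := rfl

theorem pvFlush_alpha (toks : List (String × String)) (buf : List Char) :
    pvFlushB toks (some (true, buf)) = toks ++ [pvEmitA buf] := by
  simp only [pvFlushB, pvEmitA, true_and]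
  split <;> simp

theorem pvFlush_other (toks : List (String × String)) (buf : List Char) :
    pvFlushB toks (some (false, buf)) = toks ++ [("keyword", String.mk buf)] := by
  simp [pvFlushB]

theorem pvAlpha_not_space (c : Char) (h : PySem.Chars.isalpha c = true) :
    PySem.Chars.isspace c = false := by
  simp [PySem.Chars.isalpha, PySem.Chars.isupper, PySem.Chars.islower, Char.le_def,
    UInt32.le_iff_toNat_le] at h
  simp only [PySem.Chars.isspace]
  simp only [Bool.or_eq_false_iff, Bool.and_eq_false_iff, decide_eq_false_iff_not]
  omega

theorem pvParen_not_alpha_l : PySem.Chars.isalpha '(' = false := by decide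
theorem pvParen_not_alpha_r : PySem.Chars.isalpha ')' = false := by decide

-- the combined invariant: running B's fold from each of its three states equals A's loop
theorem pvMain : ∀ (n : Nat) (cs : List Char), cs.length ≤ n →
    (∀ toks, pvRun (toks, none) cs = toks ++ pvLoopA cs) ∧
    (∀ toks buf, pvRun (toks, some (false, buf)) cs
        = toks ++ ("keyword", String.mk (buf ++ (pvScanOther cs).1)) :: pvLoopA (pvScanOther cs).2) ∧
    (∀ toks buf, pvRun (toks, some (true, buf)) cs
        = toks ++ pvEmitA (buf ++ (pvScanAlpha cs).1) :: pvLoopA (pvScanAlpha cs).2) := by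
  intro n
  induction n with
  | zero =>
    intro cs hcs
    have h0 : cs = [] := List.eq_nil_of_length_eq_zero (Nat.le_zero.mp hcs)
    subst h0
    refine ⟨fun toks => by simp [pvRun_nil, pvFlushB, pvLoopA],
            fun toks buf => by simp [pvRun_nil, pvFlush_other, pvScanOther, pvLoopA],
            fun toks buf => by simp [pvRun_nil, pvFlush_alpha, pvScanAlpha, pvLoopA]⟩
  | succ m ih =>
    intro cs hcs
    match cs with
    | [] =>
      refine ⟨fun toks => by simp [pvRun_nil, pvFlushB, pvLoopA],
              fun toks buf => by simp [pvRun_nil, pvFlush_other, pvScanOther, pvLoopA],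
              fun toks buf => by simp [pvRun_nil, pvFlush_alpha, pvScanAlpha, pvLoopA]⟩
    | c :: cs =>
      have hcs' : cs.length ≤ m := by simpa using hcs
      obtain ⟨ihN, ihO, ihA⟩ := ih cs hcs'
      by_cases hsp : PySem.Chars.isspace c = true
      · -- whitespace: every state flushes (or stays empty) and continues from none
        have hal : PySem.Chars.isalpha c = false := by
          by_contra hh
          have := pvAlpha_not_space c (by simpa using hh)
          simp [this] at hsp
        refine ⟨fun toks => ?_, fun toks buf => ?_, fun toks buf => ?_⟩
        · rw [pvRun_cons]; simp only [pvStepB, hsp, if_pos, pvFlush_none, pvFlush_alpha, pvFlush_other]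
          rw [ihN]; simp [pvLoopA, hsp]
        · rw [pvRun_cons]; simp only [pvStepB, hsp, if_pos, pvFlush_none, pvFlush_alpha, pvFlush_other]
          rw [ihN]; simp [pvLoopA, pvScanOther, hsp]
        · rw [pvRun_cons]; simp only [pvStepB, hsp, if_pos, pvFlush_none, pvFlush_alpha, pvFlush_other]
          rw [ihN]; simp [pvLoopA, pvScanAlpha, hsp, hal]
      · by_cases hpar : c = '(' ∨ c = ')'
        · -- paren: flush then emit the paren, continue from none
          refine ⟨fun toks => ?_, fun toks buf => ?_, fun toks buf => ?_⟩
          · rw [pvRun_cons]; simp only [pvStepB, hsp, hpar, if_pos, if_neg, Bool.false_eq_true,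
              not_false_iff, pvFlush_none, pvFlush_alpha, pvFlush_other]
            rw [ihN]
            rcases hpar with rfl | rfl <;> simp [pvLoopA, PySem.Chars.isspace] <;> try decide
          · rw [pvRun_cons]; simp only [pvStepB, hsp, hpar, if_pos, if_neg, Bool.false_eq_true,
              not_false_iff, pvFlush_none, pvFlush_alpha, pvFlush_other]
            rw [ihN]
            rcases hpar with rfl | rfl <;> simp [pvLoopA, pvScanOther, PySem.Chars.isspace] <;> try decide
          · rw [pvRun_cons]; simp only [pvStepB, hsp, hpar, if_pos, if_neg, Bool.false_eq_true,
              not_false_iff, pvFlush_none, pvFlush_alpha, pvFlush_other]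
            rw [ihN]
            rcases hpar with rfl | rfl <;>
              simp [pvLoopA, pvScanAlpha, PySem.Chars.isspace, pvParen_not_alpha_l,
                pvParen_not_alpha_r] <;> try decide
        · push_neg at hpar
          obtain ⟨hl, hr⟩ := hpar
          by_cases hal : PySem.Chars.isalpha c = true
          · -- letter, not space/paren
            refine ⟨fun toks => ?_, fun toks buf => ?_, fun toks buf => ?_⟩
            · rw [pvRun_cons]
              simp only [pvStepB, hsp, hl, hr, or_self, if_neg, Bool.false_eq_true,
                not_false_iff, false_or, or_false, hal]
              rw [ihA]
              simp [pvLoopA, hsp, hl, hr, hal, pvEmitA]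
            · rw [pvRun_cons]
              simp only [pvStepB, hsp, hl, hr, or_self, if_neg, Bool.false_eq_true,
                not_false_iff, false_or, or_false]
              rw [ihO]
              simp [pvScanOther, hsp, hl, hr]
            · rw [pvRun_cons]
              simp only [pvStepB, hsp, hl, hr, or_self, if_neg, Bool.false_eq_true,
                not_false_iff, false_or, or_false, hal, if_pos]
              rw [ihA]
              simp [pvScanAlpha, hal]
          · -- other char, not space/paren/letter
            refine ⟨fun toks => ?_, fun toks buf => ?_, fun toks buf => ?_⟩
            · rw [pvRun_cons]
              simp only [pvStepB, hsp, hl, hr, or_self, if_neg, Bool.false_eq_true,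
                not_false_iff, false_or, or_false,
                show PySem.Chars.isalpha c = false from by simpa using hal]
              rw [ihO]
              simp [pvLoopA, hsp, hl, hr, hal]
            · rw [pvRun_cons]
              simp only [pvStepB, hsp, hl, hr, or_self, if_neg, Bool.false_eq_true,
                not_false_iff, false_or, or_false]
              rw [ihO]
              simp [pvScanOther, hsp, hl, hr]
            · rw [pvRun_cons]
              simp only [pvStepB, hsp, hl, hr, or_self, if_neg, Bool.false_eq_true,
                not_false_iff, false_or, or_false, hal, pvFlush_alpha]
              rw [ihO]
              simp [pvScanAlpha, pvEmitA, pvLoopA, hsp, hl, hr, hal]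

-- ===== VERDICT (by name: the statement is the Claim_ definition above) =====
theorem search_tokenizer_spec : Claim_equal_search_tokenizer := by
  intro s _
  unfold Spec_search_tokenizer search_tokenizer search_tokenizer_alt
  have h := (pvMain s.toList.length s.toList le_rfl).1 []
  simpa [pvRun] using h.symm
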